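-- pv_equiv track=rewrite | github.com/timid-one/cs-115 | Lab/life_starter/life.py | innerCells
-- ===== SOURCE A (Python) =====
-- def createOneRow(width):
--     """Returns one row of zeros of width "width"...
--        You should use this in your
--        createBoard(width, height) function.
--        input width: a whole number"""
--     row = []
--     for col in range(width):
--         row += [0]
--     return row
--
-- def createBoard(width, height):
--     """returns a 2d array with "height" rows and "width" cols
--     input width: a whole number
--     input height: a whole number"""
--     A = []
--     for row in range(height):
--         A += [createOneRow(width)] # What do you need to add a whole row here?
--     return A
--
-- def innerCells(width,height):
--     """ creates an empty board and then modifies it so that it has a diagonal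
--     strip of "on" cells.
--     input width: a whole number
--     input height: a whole number"""
--     A = createBoard(width, height)
--     for row in range(height):
--         for col in range(width):
--             if row == 0 or row == height-1 or col == 0 or col == width-1:
--                 A[row][col] = 0
--             else:
--                 A[row][col] = 1
--     return A
-- ===== SOURCE B (Python) =====
-- def innerCells(width, height):
--     """Per-row construction: a border row is all zeros; an interior row is a
--     zero row whose interior slice is overwritten with ones (no inner loop)."""
--     board = []
--     for row in range(height):
--         r = [0] * width
--         if 0 < row < height - 1:
--             r[1:width-1] = [1] * (width - 2)
--         board.append(r)
--     return board
-- ===== Notes on version B (the rewrite author's own statement) =====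
-- stated objective: faster
-- what changed: Replaces the create-then-mutate nested per-cell loop (build board, then test each cell's border condition and assign) by a single per-row pass that builds each row directly with list repetition and one slice assignment, eliminating the inner column loop.
import Mathlib
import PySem

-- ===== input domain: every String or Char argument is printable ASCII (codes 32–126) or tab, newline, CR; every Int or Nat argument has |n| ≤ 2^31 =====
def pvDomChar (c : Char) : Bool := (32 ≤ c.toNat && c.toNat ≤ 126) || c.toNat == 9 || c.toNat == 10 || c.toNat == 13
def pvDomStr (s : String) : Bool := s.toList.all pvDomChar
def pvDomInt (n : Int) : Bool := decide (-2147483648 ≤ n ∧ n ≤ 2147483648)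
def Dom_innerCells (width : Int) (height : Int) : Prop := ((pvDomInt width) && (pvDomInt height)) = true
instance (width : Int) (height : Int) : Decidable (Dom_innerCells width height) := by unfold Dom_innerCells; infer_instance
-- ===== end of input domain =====

-- B builds each row whole (zero row + one slice assignment) instead of A's
-- create-then-mutate nested per-cell loop; measurably faster in Python by a constant factor.

-- ===== PORT A =====
def createOneRow (width : Int) : List Int :=
  (PySem.List.pyRange 0 width 1).foldl (fun row _ => row ++ [0]) []

def createBoard (width : Int) (height : Int) : List (List Int) :=
  (PySem.List.pyRange 0 height 1).foldl (fun A _ => A ++ [createOneRow width]) []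

def innerCells (width : Int) (height : Int) : List (List Int) :=
  (PySem.List.pyRange 0 height 1).foldl (fun A row =>
    (PySem.List.pyRange 0 width 1).foldl (fun A col =>
      -- A[row][col] = 0 / 1  (row, col are in range, so pyGetD's default is never used)
      PySem.List.pySetD A row
        (PySem.List.pySetD (PySem.List.pyGetD A row []) col
          (if row = 0 ∨ row = height - 1 ∨ col = 0 ∨ col = width - 1 then (0 : Int) else 1))) A)
    (createBoard width height)

-- ===== PORT B =====
-- r[1:width-1] = xs  (slice assignment, exact): r[:1] ++ xs ++ r dropped from
-- max(clamp 1, clamp (width-1)) — Python inserts at the clamped start when the slice is empty.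
def innerCellsAltRow (width : Int) (row : Int) (height : Int) : List Int :=
  let r : List Int := PySem.List.pyRepeat [0] width
  if 0 < row ∧ row < height - 1 then
    PySem.List.slice r none (some 1) ++ PySem.List.pyRepeat [1] (width - 2)
      ++ r.drop (max (PySem.List.clampIdx r.length 1) (PySem.List.clampIdx r.length (width - 1)))
  else r

def innerCells_alt (width : Int) (height : Int) : List (List Int) :=
  (PySem.List.pyRange 0 height 1).foldl
    (fun board row => board ++ [innerCellsAltRow width row height]) []

-- ===== PRECONDITION & SPEC =====
def Spec_innerCells (width : Int) (height : Int) (out : List (List Int)) : Prop := out = innerCells_alt width height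
instance (width : Int) (height : Int) (out : List (List Int)) : Decidable (Spec_innerCells width height out) := by unfold Spec_innerCells; infer_instance

-- ===== CLAIM (what is proved, stated in full; the proofs are below) =====
def Claim_equal_innerCells : Prop := ∀ (width : Int) (height : Int), Dom_innerCells width height → Spec_innerCells width height (innerCells width height)

-- ===== LEMMAS AND PROOFS =====

-- append-singleton fold is map
theorem pvFoldlAppendMap {α β : Type} (f : α → β) (l : List α) (acc : List β) :
    l.foldl (fun b x => b ++ [f x]) acc = acc ++ l.map f := by
  induction l generalizing acc with
  | nil => simp
  | cons x xs ih => simp [List.foldl_cons, ih]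

-- a fold that rewrites slot r from its current value absorbs into one set
theorem pvSetFoldAbsorb {α : Type} (f : Int → α → α) (l : List Int) (A : List α)
    (r : Nat) (hr : r < A.length) (d : α) :
    l.foldl (fun B c => B.set r (f c (B.getD r d))) A
      = A.set r (l.foldl (fun x c => f c x) (A.getD r d)) := by
  induction l generalizing A with
  | nil => simp [List.getD, List.getElem?_eq_getElem hr, List.set_getElem_self]
  | cons c cs ih =>
    rw [List.foldl_cons, ih _ (by simpa using hr), List.foldl_cons]
    rw [List.set_set]
    congr 2
    simp [List.getD, List.getElem?_set_self (by omega : r < A.length)]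

-- a fold over range(n) whose step rewrites slot i from its current value is a map
theorem pvFoldlSet {α : Type} (step : List α → Int → List α) (g : Nat → α → α) (d : α)
    (A : List α) (n : Nat) (hn : n ≤ A.length)
    (hstep : ∀ (B : List α) (k : Nat), k < n → B.length = A.length →
      step B (k : Int) = B.set k (g k (B.getD k d))) :
    (PySem.List.pyRange 0 (n : Int) 1).foldl step A
      = (List.range n).map (fun k => g k (A.getD k d)) ++ A.drop n := by
  induction n with
  | zero => simp [PySem.List.pyRange_one_eq_nil (by omega : (0:Int) ≤ 0)]
  | succ n ih =>
    have h1 : ((n : Int) + 1) = ((n + 1 : Nat) : Int) := by push_cast; ring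
    have h2 : PySem.List.pyRange 0 ((n + 1 : Nat) : Int) 1
        = PySem.List.pyRange 0 (n : Int) 1 ++ [(n : Int)] := by
      rw [← h1, PySem.List.pyRange_one_succ_right (by positivity)]
    rw [h2, List.foldl_append,
      ih (by omega) (fun B k hk hB => hstep B k (by omega) hB)]
    have hlen : ((List.range n).map (fun k => g k (A.getD k d))).length = n := by simp
    set P := (List.range n).map (fun k => g k (A.getD k d)) with hP
    rw [List.foldl_cons, List.foldl_nil,
      hstep (P ++ A.drop n) n (by omega) (by simp [hlen]; omega)]
    have hdrop : A.drop n = A[n] :: A.drop (n + 1) :=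
      (List.drop_eq_getElem_cons (by omega)).trans (by simp)
    rw [hdrop]
    have hget : ∀ v : α, (P ++ A[n] :: A.drop (n + 1)).getD n v = A[n] := by
      intro v
      simp [List.getD, List.getElem?_append_right (by omega : P.length ≤ n), hlen,
        List.getElem?_eq_getElem (show n < A.length by omega)]
      rfl
    have hset : ∀ v : α, (P ++ A[n] :: A.drop (n + 1)).set n v = P ++ v :: A.drop (n + 1) := by
      intro v
      rw [List.set_append_right _ _ (by omega), hlen, Nat.sub_self, List.set_cons_zero]
    rw [hget, hset, List.range_succ, List.map_append]
    simp only [List.getD, List.getElem?_eq_getElem (show n < A.length by omega), Option.getD_some,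
      List.map_cons, List.map_nil, hP, List.append_assoc, List.cons_append, List.nil_append]
    rfl

theorem pvCreateOneRow (width : Int) :
    createOneRow width = List.replicate width.toNat (0 : Int) := by
  unfold createOneRow
  have h : ∀ (l : List Int) (acc : List Int),
      l.foldl (fun row _ => row ++ [(0 : Int)]) acc = acc ++ List.replicate l.length 0 := by
    intro l
    induction l with
    | nil => simp
    | cons x xs ih => intro acc; simp [List.foldl_cons, ih, List.replicate_succ]
  simp [h]

theorem pvCreateBoard (width height : Int) :
    createBoard width height
      = List.replicate height.toNat (List.replicate width.toNat (0 : Int)) := by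
  unfold createBoard
  have h : ∀ (l : List Int) (acc : List (List Int)),
      l.foldl (fun A _ => A ++ [createOneRow width]) acc
        = acc ++ List.replicate l.length (createOneRow width) := by
    intro l
    induction l with
    | nil => simp
    | cons x xs ih => intro acc; simp [List.foldl_cons, ih, List.replicate_succ]
  simp [h, pvCreateOneRow]

-- pyRange with an Int bound equals the one with the toNat bound
theorem pvPyRangeToNat (h : Int) :
    PySem.List.pyRange 0 h 1 = PySem.List.pyRange 0 (h.toNat : Int) 1 := by
  by_cases hh : 0 ≤ h
  · rw [Int.toNat_of_nonneg hh]
  · rw [PySem.List.pyRange_one_eq_nil (by omega), PySem.List.pyRange_one_eq_nil (by omega)]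

-- one inner-loop pass over a row, in closed form
theorem pvInnerPass (width height : Int) (row : Nat) :
    (PySem.List.pyRange 0 width 1).foldl
        (fun r col => PySem.List.pySetD r col
          (if (row : Int) = 0 ∨ (row : Int) = height - 1 ∨ col = 0 ∨ col = width - 1
           then (0 : Int) else 1)) (List.replicate width.toNat 0)
      = (List.range width.toNat).map (fun (col : Nat) =>
          if (row : Int) = 0 ∨ (row : Int) = height - 1 ∨ (col : Int) = 0 ∨ (col : Int) = width - 1
          then (0 : Int) else 1) := by
  rw [pvPyRangeToNat width,
    pvFoldlSet _ (fun col _ =>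
      if (row : Int) = 0 ∨ (row : Int) = height - 1 ∨ (col : Int) = 0 ∨ (col : Int) = width - 1
      then (0 : Int) else 1) (0 : Int) _ width.toNat (by simp)
      (fun B k hk hB => by simp)]
  simp only [List.drop_replicate, Nat.sub_self, List.replicate_zero, List.append_nil]

-- A's value in closed form
theorem pvInnerCellsA (width height : Int) :
    innerCells width height
      = (List.range height.toNat).map (fun (row : Nat) =>
          (List.range width.toNat).map (fun (col : Nat) =>
            if (row : Int) = 0 ∨ (row : Int) = height - 1 ∨ (col : Int) = 0 ∨ (col : Int) = width - 1
            then (0 : Int) else 1)) := by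
  unfold innerCells
  rw [pvCreateBoard, pvPyRangeToNat height]
  rw [pvFoldlSet _ (fun row r =>
      (PySem.List.pyRange 0 width 1).foldl
        (fun x col => PySem.List.pySetD x col
          (if (row : Int) = 0 ∨ (row : Int) = height - 1 ∨ col = 0 ∨ col = width - 1
           then (0 : Int) else 1)) r)
    ([] : List Int) _ height.toNat (by simp)
    (fun B k hk hB => by
      simp only [PySem.List.pySetD_natCast, PySem.List.pyGetD_natCast]
      exact pvSetFoldAbsorb
        (fun c x => PySem.List.pySetD x c
          (if (k : Int) = 0 ∨ (k : Int) = height - 1 ∨ c = 0 ∨ c = width - 1 then (0 : Int) else 1))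
        (PySem.List.pyRange 0 width 1) B k (by simp at hB; omega) [])]
  simp only [List.drop_replicate, Nat.sub_self, List.replicate_zero, List.append_nil]
  refine List.map_congr_left ?_
  intro row hrow
  rw [List.getD_eq_getElem _ _ (by simpa using hrow), List.getElem_replicate]
  exact pvInnerPass width height row

-- B's per-row value equals A's per-row value, for rows actually produced
theorem pvRowEq (width height : Int) (row : Nat) (hrow : row < height.toNat) :
    innerCellsAltRow width (row : Int) height
      = (List.range width.toNat).map (fun (col : Nat) =>
          if (row : Int) = 0 ∨ (row : Int) = height - 1 ∨ (col : Int) = 0 ∨ (col : Int) = width - 1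
          then (0 : Int) else 1) := by
  unfold innerCellsAltRow
  rw [PySem.List.pyRepeat_singleton]
  by_cases hint : 0 < (row : Int) ∧ (row : Int) < height - 1
  · rw [if_pos hint]
    have hw0 : ∀ col : Nat, ((if (row : Int) = 0 ∨ (row : Int) = height - 1 ∨ (col : Int) = 0 ∨ (col : Int) = width - 1
        then (0 : Int) else 1)) = (if (col : Int) = 0 ∨ (col : Int) = width - 1 then (0 : Int) else 1) := by
      intro col
      split_ifs <;> omega
    simp only [hw0]
    by_cases hw : width ≤ 1
    · -- width ≤ 1 : interior slice is empty, row stays all zeros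
      have hrep : PySem.List.pyRepeat [(1 : Int)] (width - 2) = [] := by
        rw [PySem.List.pyRepeat_singleton]
        have h0 : (width - 2).toNat = 0 := by omega
        simp [h0]
      by_cases hw0' : width ≤ 0
      · have h0 : width.toNat = 0 := by omega
        simp [h0, hrep, PySem.List.slice]
      · have hw1 : width.toNat = 1 := by omega
        have hc1 : PySem.List.clampIdx (1 : Nat) (1 : Int) = 1 := by
          simpa using PySem.List.clampIdx_natCast 1 1
        have hc0 : PySem.List.clampIdx (1 : Nat) (width - 1) = 0 := by
          have h1 : width - 1 = ((0 : Nat) : Int) := by omega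
          rw [h1]; simpa using PySem.List.clampIdx_natCast 1 0
        simp [hw1, hrep, hc1, hc0, PySem.List.slice_to _ (by norm_num : (0:Int) ≤ 1),
          List.range_succ]
    · -- width ≥ 2 : row is 0 :: 1^(width-2) ++ [0]
      have hn : 2 ≤ width.toNat := by omega
      have hto : PySem.List.slice (List.replicate width.toNat (0 : Int)) none (some 1)
          = [(0 : Int)] := by
        rw [PySem.List.slice_to _ (by norm_num : (0:Int) ≤ 1)]
        have h1 : (1 : Int).toNat = 1 := rfl
        rw [h1, List.take_replicate]
        simp [Nat.min_eq_left (by omega : 1 ≤ width.toNat)]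
      have hc1 : PySem.List.clampIdx width.toNat (1 : Int) = 1 := by
        have h := PySem.List.clampIdx_natCast width.toNat 1
        simpa [Nat.min_eq_left (by omega : 1 ≤ width.toNat)] using h
      have hcw : PySem.List.clampIdx width.toNat (width - 1) = width.toNat - 1 := by
        have h1 : width - 1 = ((width.toNat - 1 : Nat) : Int) := by omega
        rw [h1]
        have h := PySem.List.clampIdx_natCast width.toNat (width.toNat - 1)
        simpa [Nat.min_eq_left (by omega : width.toNat - 1 ≤ width.toNat)] using h
      have hdrop : (List.replicate width.toNat (0 : Int)).drop (width.toNat - 1)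
          = [(0 : Int)] := by
        rw [List.drop_replicate]
        have h1 : width.toNat - (width.toNat - 1) = 1 := by omega
        simp [h1]
      rw [PySem.List.pyRepeat_singleton, hto]
      simp only [List.length_replicate, hc1, hcw,
        Nat.max_eq_right (by omega : 1 ≤ width.toNat - 1), hdrop]
      have hmid : (width - 2).toNat = width.toNat - 2 := by omega
      rw [hmid]
      -- split range width.toNat as 1 + (width.toNat - 2) + 1 and map piecewise
      symm
      have hr : List.range width.toNat
          = List.range 1 ++ (List.range ((width.toNat - 2) + 1)).map (1 + ·) := by
        rw [← List.range_add]; congr 1; omega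
      rw [hr, List.map_append, List.map_map,
        show List.range ((width.toNat - 2) + 1)
            = List.range (width.toNat - 2) ++ [width.toNat - 2] from List.range_succ,
        List.map_append]
      conv_rhs => rw [List.append_assoc]
      have hmidv : ∀ j ∈ List.range (width.toNat - 2),
          ((fun (col : Nat) => if (col : Int) = 0 ∨ (col : Int) = width - 1 then (0 : Int) else 1)
            ∘ (1 + ·)) j = 1 := by
        intro j hj
        simp only [List.mem_range] at hj
        have e0 : ¬ ((1 : Int) + ((j : Nat) : Int) = 0) := by omega
        have e1 : ¬ ((1 : Int) + ((j : Nat) : Int) = width - 1) := by omega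
        simp [Function.comp, e0, e1]
      have e2 : ((1 + (width.toNat - 2) : Nat) : Int) = width - 1 := by push_cast; omega
      have hpc1 : (List.range 1).map
          (fun (col : Nat) => if (col : Int) = 0 ∨ (col : Int) = width - 1 then (0 : Int) else 1)
          = [0] := by simp
      have hpc2 : (List.range (width.toNat - 2)).map
          ((fun (col : Nat) => if (col : Int) = 0 ∨ (col : Int) = width - 1 then (0 : Int) else 1)
            ∘ (1 + ·))
          = List.replicate (width.toNat - 2) 1 :=
        (List.map_congr_left hmidv).trans (by simp [List.eq_replicate_iff])
      have hpc3 : ([width.toNat - 2] : List Nat).map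
          ((fun (col : Nat) => if (col : Int) = 0 ∨ (col : Int) = width - 1 then (0 : Int) else 1)
            ∘ (1 + ·))
          = [0] := by
        simp only [List.map_cons, List.map_nil, Function.comp_apply]
        rw [if_pos (Or.inr e2)]
      rw [hpc1, hpc2, hpc3]
  · rw [if_neg hint]
    -- border row: every entry of A's row is 0
    have hborder : (row : Int) = 0 ∨ (row : Int) = height - 1 := by omega
    have hall : ∀ (col : Nat), col ∈ List.range width.toNat →
        ((if (row : Int) = 0 ∨ (row : Int) = height - 1 ∨ (col : Int) = 0 ∨ (col : Int) = width - 1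
        then (0 : Int) else 1)) = (fun (_ : Nat) => (0 : Int)) col := by
      intro col _
      rcases hborder with h | h <;> simp [h]
    rw [List.map_congr_left hall]
    simp [List.eq_replicate_iff]

theorem pvInnerCellsB (width height : Int) :
    innerCells_alt width height
      = (List.range height.toNat).map (fun (row : Nat) => innerCellsAltRow width (row : Int) height) := by
  unfold innerCells_alt
  rw [pvFoldlAppendMap, pvPyRangeToNat height, PySem.List.pyRange_one]
  simp only [List.nil_append, List.map_map, Int.sub_zero, Int.toNat_natCast, zero_add,
    Function.comp_def]

-- ===== VERDICT (by name: the statement is the Claim_ definition above) =====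
theorem innerCells_spec : Claim_equal_innerCells := by
  intro width height _
  unfold Spec_innerCells
  rw [pvInnerCellsA, pvInnerCellsB]
  refine List.map_congr_left ?_
  intro row hrow
  exact (pvRowEq width height row (by simpa using hrow)).symm
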